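-- pv_equiv track=rewrite | github.com/kateyixuan/ESC180-Intro-to-Programming | synonyms.py | file_punc_cleaner
-- ===== SOURCE A (Python) =====
-- def file_punc_cleaner(file):
--     ch_start = 0
--     lst = []
--
--     '''return a list in the format of [[word,word,word],[sentence],...]'''
--
--     for ch in range(len(file)):
--         if file[ch] in ['?','.','!']:
--             lst += [[file[ch_start:ch]]]
--             ch_start = ch+2
--
--     for s in range(len(lst)):
--         for i in range(len(lst[s])):
--             for ch in lst[s][i]:
--                 if ch in [",", "-", "--", ":", ";","\"","(",")"]:
--                     lst[s][i] = (lst[s][i]).replace(ch," ")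
--             lst[s] = lst[s][i].lower().split()
--
--     return lst
-- ===== SOURCE B (Python) =====
-- def file_punc_cleaner(file):
--     '''return a list in the format of [[word,word,word],[sentence],...]'''
--     term_idxs = [i for i, c in enumerate(file) if c in '?.!']
--     table = str.maketrans(',-:;"()', '       ')
--     out = []
--     start = 0
--     for i in term_idxs:
--         out.append(file[start:i].translate(table).lower().split())
--         start = i + 2
--     return out
-- ===== Notes on version B (the rewrite author's own statement) =====
-- stated objective: simpler
-- what changed: B collects all sentence-terminator indices in one enumerate pass and then slices the spans between them, cleaning each span with a single str.translate table, instead of A's index loop with a mutable start pointer followed by a second mutating cleanup loop that calls str.replace once per punctuation character.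
import Mathlib
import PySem

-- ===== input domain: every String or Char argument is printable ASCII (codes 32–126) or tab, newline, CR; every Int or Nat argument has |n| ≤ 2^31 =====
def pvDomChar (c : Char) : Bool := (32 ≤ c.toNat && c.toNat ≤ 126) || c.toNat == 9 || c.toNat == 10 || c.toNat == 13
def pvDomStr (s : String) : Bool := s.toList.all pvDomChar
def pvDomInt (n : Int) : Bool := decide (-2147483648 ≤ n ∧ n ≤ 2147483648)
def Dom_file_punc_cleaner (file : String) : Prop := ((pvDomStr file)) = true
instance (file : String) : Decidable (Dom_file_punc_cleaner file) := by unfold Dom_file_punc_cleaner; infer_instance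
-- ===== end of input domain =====

-- B replaces A's scan-with-mutable-start plus mutating cleanup loop by: one pass collecting
-- terminator indices, then slicing the spans between them and cleaning each span with a
-- single character translation (objective: simpler decomposition, same cost).

-- ===== PORT A =====

-- inner 'for ch in lst[s][i]: if ch in [",","-","--",…]: lst[s][i] = lst[s][i].replace(ch," ")'
-- ("--" can never equal a single character, so it is omitted at the Char level)
def pvReplLoopA (s0 : List Char) : List Char :=
  s0.foldl (fun acc ch =>
    if ch ∈ [',', '-', ':', ';', '"', '(', ')'] then
      PySem.Chars.replace acc [ch] [' ']
    else acc) s0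

-- body of 'for i in range(len(lst[s])): … ; lst[s] = lst[s][i].lower().split()'
def pvSentStepA (sent : List String) : List String :=
  (PySem.List.pyRange 0 (sent.length : Int) 1).foldl (fun cur i =>
    match PySem.List.pyGet? cur i with
    | none => cur  -- unreachable guard: Python would raise IndexError here
    | some str =>
        (PySem.Chars.split₀ (PySem.Chars.lower (pvReplLoopA str.toList))).map String.ofList) sent

def file_punc_cleaner (file : String) : List (List String) :=
  let cs := file.toList
  -- first loop: 'for ch in range(len(file)): …', state (ch_start, lst)
  let p := (PySem.List.pyRange 0 (cs.length : Int) 1).foldl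
    (fun (st : Int × List (List String)) ch =>
      match PySem.List.pyGet? cs ch with
      | none => st  -- unreachable guard
      | some c =>
          if c ∈ ['?', '.', '!'] then
            (ch + 2, st.2 ++ [[String.ofList (PySem.List.slice cs (some st.1) (some ch))]])
          else st)
    ((0 : Int), ([] : List (List String)))
  -- second loop: 'for s in range(len(lst)): lst[s] = …' rewrites each entry in place
  p.2.map pvSentStepA

-- ===== PORT B =====

-- '[i for i, c in enumerate(file) if c in "?.!"]' (enumerate = recursion with a counter)
def pvTermIdxs : List Char → Int → List Int
  | [], _ => []
  | c :: t, i => if c ∈ ['?', '.', '!'] then i :: pvTermIdxs t (i + 1) else pvTermIdxs t (i + 1)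

-- '.translate(table).lower().split()' — the table maps each of ,-:;"() to a space
def pvCleanB (cs : List Char) : List String :=
  (PySem.Chars.split₀ (PySem.Chars.lower
      (cs.map (fun c => if c ∈ [',', '-', ':', ';', '"', '(', ')'] then ' ' else c)))).map String.ofList

-- 'for i in term_idxs: out.append(file[start:i]…); start = i + 2'
def pvGoB (cs : List Char) : Int → List Int → List (List String)
  | _, [] => []
  | start, i :: rest => pvCleanB (PySem.List.slice cs (some start) (some i)) :: pvGoB cs (i + 2) rest

def file_punc_cleaner_alt (file : String) : List (List String) :=
  pvGoB file.toList 0 (pvTermIdxs file.toList 0)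

-- ===== PRECONDITION & SPEC =====
def Spec_file_punc_cleaner (file : String) (out : List (List String)) : Prop := out = file_punc_cleaner_alt file
instance (file : String) (out : List (List String)) : Decidable (Spec_file_punc_cleaner file out) := by unfold Spec_file_punc_cleaner; infer_instance

-- ===== CLAIM (what is proved, stated in full; the proofs are below) =====
def Claim_equal_file_punc_cleaner : Prop := ∀ (file : String), Dom_file_punc_cleaner file → Spec_file_punc_cleaner file (file_punc_cleaner file)

-- ===== LEMMAS AND PROOFS =====

-- single-character str.replace is a character map
theorem pv_replace_go_single (c d : Char) :
    ∀ (l : List Char) (fuel : Nat) (acc : List Char), l.length ≤ fuel →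
      PySem.Chars.replace.go [c] [d] fuel l acc
        = acc.reverse ++ l.map (fun x => if x = c then d else x) := by
  intro l
  induction l with
  | nil => intro fuel acc _; cases fuel <;> simp [PySem.Chars.replace.go]
  | cons x t ih =>
      intro fuel acc h
      cases fuel with
      | zero => simp at h
      | succ n =>
        simp only [List.length_cons, Nat.succ_le_succ_iff] at h
        by_cases hx : x = c
        · subst hx
          have : PySem.Chars.replace.go [x] [d] (n+1) (x :: t) acc
              = PySem.Chars.replace.go [x] [d] n t (d :: acc) := by
            simp [PySem.Chars.replace.go, List.isPrefixOf]
          rw [this, ih n (d :: acc) h]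
          simp
        · have : PySem.Chars.replace.go [c] [d] (n+1) (x :: t) acc
              = PySem.Chars.replace.go [c] [d] n t (x :: acc) := by
            simp [PySem.Chars.replace.go, List.isPrefixOf]
            intro h'
            exact absurd h'.symm hx
          rw [this, ih n (x :: acc) h]
          simp [hx]

theorem pv_replace_single (l : List Char) (c d : Char) :
    PySem.Chars.replace l [c] [d] = l.map (fun x => if x = c then d else x) := by
  simp [PySem.Chars.replace, pv_replace_go_single c d l l.length [] (le_refl _)]

theorem pv_map_id (l : List Char) (f : Char → Char) (h : ∀ x ∈ l, f x = x) : l.map f = l := by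
  induction l with
  | nil => rfl
  | cons a t ih =>
      simp only [List.map_cons, h a (by simp)]
      rw [ih (fun x hx => h x (by simp [hx]))]

def pvIsPunct (c : Char) : Prop := c ∈ [',', '-', ':', ';', '"', '(', ')']

theorem pv_foldl_replace (rest : List Char) :
    ∀ acc : List Char, (∀ c, pvIsPunct c → c ∈ acc → c ∈ rest) →
      rest.foldl (fun acc ch =>
          if ch ∈ [',', '-', ':', ';', '"', '(', ')'] then
            PySem.Chars.replace acc [ch] [' ']
          else acc) acc
        = acc.map (fun c => if c ∈ [',', '-', ':', ';', '"', '(', ')'] then ' ' else c) := by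
  induction rest with
  | nil =>
      intro acc hinv
      rw [List.foldl_nil]
      symm
      apply pv_map_id
      intro x hx
      by_cases hp : x ∈ [',', '-', ':', ';', '"', '(', ')']
      · exact absurd (hinv x hp hx) (by simp)
      · simp [hp]
  | cons c rest ih =>
      intro acc hinv
      rw [List.foldl_cons]
      by_cases hc : c ∈ [',', '-', ':', ';', '"', '(', ')']
      · rw [if_pos hc, pv_replace_single]
        rw [ih _ ?inv]
        case inv =>
          intro e he hmem
          simp only [List.mem_map] at hmem
          obtain ⟨x, hx, hgx⟩ := hmem
          by_cases hxc : x = c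
          · have he' : e = ' ' := by rw [← hgx, hxc]; simp
            rw [he'] at he
            exact absurd he (by simp [pvIsPunct])
          · have he' : e = x := by rw [← hgx]; simp [hxc]
            rw [he']
            rcases List.mem_cons.mp (hinv x (he' ▸ he) hx) with h | h
            · exact absurd h hxc
            · exact h
        rw [List.map_map]
        apply List.map_congr_left
        intro x _
        by_cases hxc : x = c
        · subst hxc; simp [hc]
        · simp [hxc]
      · rw [if_neg hc, ih _ ?inv2]
        case inv2 =>
          intro e he hmem
          have := hinv e he hmem
          rcases List.mem_cons.mp this with h | h
          · subst h; exact absurd he hc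
          · exact h

theorem pv_replLoopA_eq (s0 : List Char) :
    pvReplLoopA s0 = s0.map (fun c => if c ∈ [',', '-', ':', ';', '"', '(', ')'] then ' ' else c) := by
  exact pv_foldl_replace s0 s0 (fun c _ hc => hc)

theorem pv_sentStepA_singleton (l : List Char) :
    pvSentStepA [String.ofList l] = pvCleanB l := by
  simp [pvSentStepA, pvCleanB, pv_replLoopA_eq,
    show PySem.List.pyRange 0 (1 : Int) 1 = [0] from by decide]

theorem pv_main (cs : List Char) :
    ∀ (suf : List Char) (k : Nat), cs.drop k = suf →
      ∀ (start : Int) (acc : List (List String)),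
        (((PySem.List.pyRange (k : Int) (cs.length : Int) 1).foldl
          (fun (st : Int × List (List String)) ch =>
            match PySem.List.pyGet? cs ch with
            | none => st
            | some c =>
                if c ∈ ['?', '.', '!'] then
                  (ch + 2, st.2 ++ [[String.ofList (PySem.List.slice cs (some st.1) (some ch))]])
                else st)
          (start, acc)).2).map pvSentStepA
        = acc.map pvSentStepA ++ pvGoB cs start (pvTermIdxs suf (k : Int)) := by
  intro suf
  induction suf with
  | nil =>
      intro k h start acc
      have hk : cs.length ≤ k := by
        by_contra hlt
        push Not at hlt
        have := List.drop_eq_nil_iff.mp h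
        omega
      rw [PySem.List.pyRange_one_eq_nil (by exact_mod_cast hk)]
      simp [pvTermIdxs, pvGoB]
  | cons c t ih =>
      intro k h start acc
      have hk : k < cs.length := by
        by_contra hge
        push Not at hge
        rw [List.drop_eq_nil_of_le hge] at h
        simp at h
      have hc : cs[k] = c := by
        have h0 : (cs.drop k)[0]'(by rw [h]; simp) = c := by
          simp [h]
        rw [List.getElem_drop] at h0
        simpa using h0
      have ht : cs.drop (k + 1) = t := by
        have : (cs.drop k).drop 1 = cs.drop (k + 1) := by
          rw [List.drop_drop]
        rw [← this, h]
        rfl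
      rw [PySem.List.pyRange_one_cons (by exact_mod_cast hk), List.foldl_cons]
      have hget : PySem.List.pyGet? cs (k : Int) = some c := by
        rw [PySem.List.pyGet?_natCast, List.getElem?_eq_getElem hk, hc]
      rw [hget]
      have hcast : (k : Int) + 1 = ((k + 1 : Nat) : Int) := by push_cast; ring
      by_cases hterm : c ∈ ['?', '.', '!']
      · simp only [if_pos hterm]
        rw [hcast, ih (k + 1) ht ((k : Int) + 2)
            (acc ++ [[String.ofList (PySem.List.slice cs (some start) (some (k : Int)))]])]
        simp only [pvTermIdxs, if_pos hterm, pvGoB, List.map_append, List.map_cons, List.map_nil]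
        rw [pv_sentStepA_singleton, ← hcast]
        simp
      · simp only [if_neg hterm]
        rw [hcast, ih (k + 1) ht start acc]
        simp only [pvTermIdxs, if_neg hterm, ← hcast]

-- ===== VERDICT (by name: the statement is the Claim_ definition above) =====
theorem file_punc_cleaner_spec : Claim_equal_file_punc_cleaner := by
  intro file _
  unfold Spec_file_punc_cleaner file_punc_cleaner file_punc_cleaner_alt
  have h := pv_main file.toList file.toList 0 (by simp) 0 []
  simpa using h
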